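-- pv_equiv track=rewrite | github.com/DarioBernardo/hackerrank_exercises | graphs/bfs_shortest_reach.py | bfs
-- ===== SOURCE A (Python) =====
-- def add_connection(graph, source, destination):
--     list_of_childs = graph.get(source, [])
--     list_of_childs.append(destination)
--     graph[source] = list_of_childs
--
-- def bfs_algo(graph: dict, start: int, end: int) -> int:
--     queue = [(start, 0)]
--     visited = set()
--
--     while len(queue) != 0:
--         node, cost = queue.pop(0)
--         if node == end:
--             return cost
--         if node not in visited:
--             visited.add(node)
--             children = graph[node]
--             for child in children:
--                 if child not in visited:
--                     queue.append((child, cost + 6))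
--
--     return -1
--
-- def bfs(n, m, edges, s):
--     graph = dict()
--
--     for e in edges:
--         add_connection(graph, e[0], e[1])
--         add_connection(graph, e[1], e[0])
--
--     if s not in graph:
--         return [-1] * len(edges)
--
--     result = []
--     for node in range(1, m + 1):
--         if node != s:
--             result.append(bfs_algo(graph, s, node))
--
--     return result
-- ===== SOURCE B (Python) =====
-- def bfs(n, m, edges, s):
--     # Single BFS from s computing every distance at once (A re-runs a BFS per target).
--     adj = {}
--     for u, v in edges:
--         adj.setdefault(u, []).append(v)
--         adj.setdefault(v, []).append(u)
--
--     if s not in adj: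
--         return [-1] * len(edges)
--
--     dist = {}
--     queue = [(s, 0)]
--     head = 0
--     while head < len(queue):
--         node, cost = queue[head]
--         head += 1
--         if node not in dist:
--             dist[node] = cost
--             for child in adj[node]:
--                 if child not in dist:
--                     queue.append((child, cost + 6))
--
--     return [dist.get(node, -1) for node in range(1, m + 1) if node != s]
-- ===== Notes on version B (the rewrite author's own statement) =====
-- stated objective: faster
-- what changed: B runs one BFS from s that records every node's distance in a dict (with an O(1) head-pointer queue), then reads the result list off that dict, instead of A's separate BFS search per target node; A's early return for a source with no incident edge is kept.
import Mathlib
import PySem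

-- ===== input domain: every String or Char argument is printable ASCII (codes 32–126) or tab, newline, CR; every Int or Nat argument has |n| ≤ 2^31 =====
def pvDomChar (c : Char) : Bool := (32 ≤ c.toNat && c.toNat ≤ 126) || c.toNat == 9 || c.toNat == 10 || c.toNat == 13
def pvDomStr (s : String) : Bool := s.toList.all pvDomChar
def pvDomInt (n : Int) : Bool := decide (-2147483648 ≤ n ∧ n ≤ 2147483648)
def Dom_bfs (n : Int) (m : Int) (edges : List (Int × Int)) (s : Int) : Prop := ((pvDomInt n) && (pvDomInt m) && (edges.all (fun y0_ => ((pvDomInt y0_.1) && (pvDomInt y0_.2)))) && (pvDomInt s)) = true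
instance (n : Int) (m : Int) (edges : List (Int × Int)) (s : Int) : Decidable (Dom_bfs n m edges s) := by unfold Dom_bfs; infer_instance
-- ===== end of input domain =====

-- B replaces A's per-target BFS search (one full BFS per node) by a single BFS from s that
-- records every node's distance in a dict and reads the result list off it: faster (asymptotic).

-- ===== PORT A =====

def addConnection (graph : PySem.Dict Int (List Int)) (source destination : Int) :
    PySem.Dict Int (List Int) :=
  graph.insert source (graph.getD source [] ++ [destination])

-- the while-loop of bfs_algo; fuel = 2*len(edges)+2 bounds its iteration count (each visited
-- node enqueues its adjacency list once, total adjacency size is 2*len(edges)), so the fuel-0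
-- branch is never reached on an actual call
def bfsAlgoLoop (graph : PySem.Dict Int (List Int)) (endN : Int) :
    Nat → List (Int × Int) → PySem.Set Int → Int
  | 0, _, _ => -1
  | _ + 1, [], _ => -1
  | f + 1, (node, cost) :: rest, visited =>
    if node == endN then cost
    else if PySem.Set.contains visited node then bfsAlgoLoop graph endN f rest visited
    else
      -- children := graph[node]; the KeyError branch (none) is unreachable: every enqueued
      -- node is an edge endpoint, hence a key of graph
      bfsAlgoLoop graph endN f
        (((graph.get? node).getD []).foldl
          (fun q child =>
            if PySem.Set.contains (PySem.Set.add visited node) child then q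
            else q ++ [(child, cost + 6)])
          rest)
        (PySem.Set.add visited node)

def bfsAlgo (graph : PySem.Dict Int (List Int)) (start endN : Int) (fuel : Nat) : Int :=
  bfsAlgoLoop graph endN fuel [(start, 0)] PySem.Set.empty

def bfs (n : Int) (m : Int) (edges : List (Int × Int)) (s : Int) : List Int :=
  let graph := edges.foldl
    (fun graph e => addConnection (addConnection graph e.1 e.2) e.2 e.1) PySem.Dict.empty
  if !(graph.contains s) then List.replicate edges.length (-1)
  else
    (PySem.List.pyRange 1 (m + 1) 1).foldl
      (fun result node =>
        if node != s then result ++ [bfsAlgo graph s node (2 * edges.length + 2)] else result)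
      []

-- ===== PORT B =====

-- Source B's head-pointer while-loop: the unread tail queue[head:] is carried as the pending list
-- (head only advances, appends go to the end); same fuel bound as A's loop
def bfsAltLoop (adj : PySem.Dict Int (List Int)) :
    Nat → List (Int × Int) → PySem.Dict Int Int → PySem.Dict Int Int
  | 0, _, dist => dist
  | _ + 1, [], dist => dist
  | f + 1, (node, cost) :: pending, dist =>
    if dist.contains node then bfsAltLoop adj f pending dist
    else
      bfsAltLoop adj f
        (((adj.get? node).getD []).foldl
          (fun q child =>
            if (dist.insert node cost).contains child then q
            else q ++ [(child, cost + 6)])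
          pending)
        (dist.insert node cost)

def bfs_alt (n : Int) (m : Int) (edges : List (Int × Int)) (s : Int) : List Int :=
  let adj := edges.foldl
    (fun adj e => (adj.modify e.1 [] (fun l => l ++ [e.2])).modify e.2 [] (fun l => l ++ [e.1]))
    PySem.Dict.empty
  if !(adj.contains s) then List.replicate edges.length (-1)
  else
    let dist := bfsAltLoop adj (2 * edges.length + 2) [(s, 0)] PySem.Dict.empty
    ((PySem.List.pyRange 1 (m + 1) 1).filter (fun node => node != s)).map
      (fun node => dist.getD node (-1))

-- ===== PRECONDITION & SPEC =====
def Spec_bfs (n : Int) (m : Int) (edges : List (Int × Int)) (s : Int) (out : List Int) : Prop := out = bfs_alt n m edges s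
instance (n : Int) (m : Int) (edges : List (Int × Int)) (s : Int) (out : List Int) : Decidable (Spec_bfs n m edges s out) := by unfold Spec_bfs; infer_instance

-- ===== CLAIM (what is proved, stated in full; the proofs are below) =====
def Claim_equal_bfs : Prop := ∀ (n : Int) (m : Int) (edges : List (Int × Int)) (s : Int), Dom_bfs n m edges s → Spec_bfs n m edges s (bfs n m edges s)

-- ===== LEMMAS AND PROOFS =====

-- once a node has a distance, the rest of B's loop never changes it
lemma altLoop_get?_some (adj : PySem.Dict Int (List Int)) :
    ∀ (f : Nat) (q : List (Int × Int)) (dist : PySem.Dict Int Int) (t c : Int),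
      dist.get? t = some c → (bfsAltLoop adj f q dist).get? t = some c := by
  intro f
  induction f with
  | zero => intro q dist t c ht; simp [bfsAltLoop, ht]
  | succ f ih =>
    intro q dist t c ht
    match q with
    | [] => simpa [bfsAltLoop] using ht
    | (node, cost) :: pending =>
      rw [bfsAltLoop]
      by_cases hc : dist.contains node
      · rw [if_pos hc]; exact ih _ _ _ _ ht
      · rw [if_neg hc]
        apply ih
        have hne : t ≠ node := by
          intro h; rw [h] at ht
          rw [PySem.Dict.contains_eq_isSome_get?, ht] at hc
          exact hc rfl
        rw [PySem.Dict.get?_insert_of_ne _ _ hne]; exact ht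

-- the coupling: A's target-t search over (queue, visited) equals looking t up in the distance
-- dict B's loop computes from the same queue, whenever visited and dist have the same members
-- and t is still undiscovered
lemma coupling (graph : PySem.Dict Int (List Int)) :
    ∀ (f : Nat) (q : List (Int × Int)) (visited : PySem.Set Int) (dist : PySem.Dict Int Int)
      (t : Int),
      (∀ x, PySem.Set.contains visited x = dist.contains x) →
      dist.get? t = none →
      bfsAlgoLoop graph t f q visited = ((bfsAltLoop graph f q dist).get? t).getD (-1) := by
  intro f
  induction f with
  | zero => intro q visited dist t h ht; simp [bfsAlgoLoop, bfsAltLoop, ht]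
  | succ f ih =>
    intro q visited dist t h ht
    match q with
    | [] => simp [bfsAlgoLoop, bfsAltLoop, ht]
    | (node, cost) :: rest =>
      rw [bfsAlgoLoop, bfsAltLoop]
      have hcd : dist.contains node = (dist.get? node).isSome :=
        PySem.Dict.contains_eq_isSome_get? dist node
      by_cases hn : node = t
      · subst hn
        rw [if_pos (by simp)]
        have hc : dist.contains node = false := by rw [hcd, ht]; rfl
        rw [if_neg (by simp [hc])]
        rw [altLoop_get?_some graph f _ _ node cost (PySem.Dict.get?_insert_self dist node cost)]
        rfl
      · rw [if_neg (by simp [hn])]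
        by_cases hv : PySem.Set.contains visited node
        · rw [if_pos hv, if_pos (by rw [← h]; exact hv)]
          exact ih rest visited dist t h ht
        · rw [if_neg hv, if_neg (by rw [← h]; exact hv)]
          have hdn : dist.contains node = false := by rw [← h]; exact Bool.eq_false_iff.mpr hv
          have h' : ∀ x, PySem.Set.contains (PySem.Set.add visited node) x
              = (dist.insert node cost).contains x := by
            intro x
            rw [PySem.Set.add_of_not_mem (by
              intro hmem
              exact hv ((PySem.Set.contains_iff visited node).mpr hmem))]
            rw [PySem.Dict.contains_insert]
            show List.contains (visited ++ [node]) x = _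
            simp only [List.contains_append, List.contains_cons, List.contains_nil,
              Bool.or_comm, Bool.false_or]
            rw [show List.contains visited x = dist.contains x from h x]
          have hq : (fun (q : List (Int × Int)) child =>
                if PySem.Set.contains (PySem.Set.add visited node) child then q
                else q ++ [(child, cost + 6)])
              = (fun q child =>
                if (dist.insert node cost).contains child then q
                else q ++ [(child, cost + 6)]) := by
            funext q child; rw [h' child]
          rw [hq]
          apply ih _ _ _ _ h'
          rw [PySem.Dict.get?_insert_of_ne _ _ (by exact fun hh => hn hh.symm)]
          exact ht

lemma bfsAlgo_eq_dist (graph : PySem.Dict Int (List Int)) (s t : Int) (fuel : Nat) :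
    bfsAlgo graph s t fuel
      = (bfsAltLoop graph fuel [(s, 0)] PySem.Dict.empty).getD t (-1) := by
  rw [PySem.Dict.getD_eq_get?_getD]
  exact coupling graph fuel [(s, 0)] PySem.Set.empty PySem.Dict.empty t
    (fun x => by simp [PySem.Set.contains, PySem.Set.empty, PySem.Dict.contains_empty])
    (PySem.Dict.get?_empty t)

-- ===== VERDICT (by name: the statement is the Claim_ definition above) =====
theorem bfs_spec : Claim_equal_bfs := by
  intro n m edges s _
  unfold Spec_bfs bfs bfs_alt
  -- the two adjacency builders are definitionally equal (modify = insert of the appended list)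
  have hadj : edges.foldl
      (fun graph e => addConnection (addConnection graph e.1 e.2) e.2 e.1) PySem.Dict.empty
      = edges.foldl
      (fun adj e =>
        (adj.modify e.1 [] (fun l => l ++ [e.2])).modify e.2 [] (fun l => l ++ [e.1]))
      PySem.Dict.empty := rfl
  rw [← hadj]
  set G := edges.foldl
    (fun graph e => addConnection (addConnection graph e.1 e.2) e.2 e.1) PySem.Dict.empty with hG
  by_cases hc : G.contains s
  · simp only [hc, Bool.not_true, Bool.false_eq_true, if_false]
    rw [PySem.List.foldl_append_if (fun node => node != s)
      (fun node => bfsAlgo G s node (2 * edges.length + 2))]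
    rw [List.nil_append]
    apply List.map_congr_left
    intro node _
    exact bfsAlgo_eq_dist G s node (2 * edges.length + 2)
  · simp [hc]
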